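-- pv_equiv track=rewrite | github.com/siddhisatav/siddhi_satav_FBS_work | Core_Python/Assignments/Assignment-14(Set)/Q3.py | uniqueEle
-- ===== SOURCE A (Python) =====
-- def uniqueEle(li):
--
--     dict1 = {}
--     set1 = set(li)
--     for i in li :
--
--         if i in dict1:
--             dict1[i] += 1
--
--         else :
--             dict1[i] = 1
--
--
--     return dict1 , set1
-- ===== SOURCE B (Python) =====
-- def uniqueEle(li):
--     # Different decomposition: take distinct elements first (in first-occurrence
--     # order), then count each one with one li.count scan, instead of a single
--     # accumulating dict pass.
--     uniq = list(dict.fromkeys(li))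
--     dict1 = {x: li.count(x) for x in uniq}
--     return dict1, set(li)
-- ===== Notes on version B (the rewrite author's own statement) =====
-- stated objective: alternative
-- what changed: Replaces the single accumulating dict pass with a two-phase computation: first dedup the list into its distinct elements, then build the frequency dict by a comprehension that rescans the list with li.count per distinct element.
import Mathlib
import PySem

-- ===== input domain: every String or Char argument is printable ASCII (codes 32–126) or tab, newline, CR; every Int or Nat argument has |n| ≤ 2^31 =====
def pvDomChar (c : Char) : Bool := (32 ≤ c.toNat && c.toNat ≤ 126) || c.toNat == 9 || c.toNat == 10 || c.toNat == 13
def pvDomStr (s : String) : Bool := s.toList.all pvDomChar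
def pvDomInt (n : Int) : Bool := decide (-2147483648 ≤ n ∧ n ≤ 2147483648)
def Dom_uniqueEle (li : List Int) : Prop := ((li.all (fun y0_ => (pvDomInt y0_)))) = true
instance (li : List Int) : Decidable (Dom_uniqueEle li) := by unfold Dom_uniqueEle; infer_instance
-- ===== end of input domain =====

-- B replaces A's single accumulating dict pass by a two-phase decomposition (dedup, then one li.count scan per distinct element); objective: alternative, not faster.


-- ===== PORT A =====
-- single pass: build dict1 by incrementing per element; set1 = set(li)
def uniqueEle (li : List Int) : (List (Int × Int)) × List Int :=
  let set1 : PySem.Set Int := PySem.Set.ofList li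
  let dict1 : PySem.Dict Int Int :=
    li.foldl (fun d i =>
      if d.contains i then d.modify i 0 (· + 1) else d.insert i 1)
      PySem.Dict.empty
  (dict1.items, set1)

-- ===== PORT B =====
-- two phases: dedup (dict.fromkeys order), then one li.count scan per distinct element
def uniqueEle_alt (li : List Int) : (List (Int × Int)) × List Int :=
  let uniq : List Int := PySem.List.dedup li
  let dict1 : List (Int × Int) := uniq.map (fun x => (x, (PySem.List.count li x : Int)))
  (dict1, PySem.Set.ofList li)

-- ===== PRECONDITION & SPEC =====
def Spec_uniqueEle (li : List Int) (out : (List (Int × Int)) × List Int) : Prop := out = uniqueEle_alt li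
instance (li : List Int) (out : (List (Int × Int)) × List Int) : Decidable (Spec_uniqueEle li out) := by unfold Spec_uniqueEle; infer_instance

-- ===== CLAIM (what is proved, stated in full; the proofs are below) =====
def Claim_equal_uniqueEle : Prop := ∀ (li : List Int), Dom_uniqueEle li → Spec_uniqueEle li (uniqueEle li)

-- ===== LEMMAS AND PROOFS =====

-- A's branch "increment if present else insert 1" is exactly Counter's modify step.
theorem uniqueEle_step_eq_modify (d : PySem.Dict Int Int) (i : Int) :
    (if d.contains i then d.modify i 0 (· + 1) else d.insert i 1) = d.modify i 0 (· + 1) := by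
  by_cases h : d.contains i = true
  · simp [h]
  · simp at h
    simp [PySem.Dict.modify, h, PySem.Dict.getD_of_not_contains]

-- ===== VERDICT (by name: the statement is the Claim_ definition above) =====
theorem uniqueEle_spec : Claim_equal_uniqueEle := by
  intro li _
  unfold Spec_uniqueEle uniqueEle uniqueEle_alt
  show ((li.foldl (fun d i => if d.contains i then d.modify i 0 (· + 1) else d.insert i 1)
          PySem.Dict.empty).items, PySem.Set.ofList li)
      = ((PySem.List.dedup li).map (fun x => (x, (PySem.List.count li x : Int))),
          PySem.Set.ofList li)
  have hfold :
      List.foldl (fun d i => if d.contains i then d.modify i 0 (· + 1) else d.insert i 1)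
          PySem.Dict.empty li
        = List.foldl (fun (d : PySem.Dict Int Int) i => d.modify i 0 (· + 1))
            PySem.Dict.empty li :=
    PySem.List.foldl_congr_mem _ _ _ _ (fun acc x _ => uniqueEle_step_eq_modify acc x)
  rw [hfold]
  rw [← PySem.Dict.counter_eq_foldl, PySem.Dict.items_counter]
  simp [PySem.List.count_eq]
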